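-- pv_equiv track=rewrite | github.com/drprist/Python-Basics | lesson_3/task5.py | all_sum
-- ===== SOURCE A (Python) =====
-- def all_sum(user_list):
--     list_1 = user_list.split()
--     a = 0
--     for i in list_1:
--         if i.lstrip('-').isdigit():
--             a = a + int(i)
--         else:
--             return a, False
--     return a, True
-- ===== SOURCE B (Python) =====
-- def all_sum(user_list):
--     tokens = user_list.split()
--
--     def is_int_token(t):
--         return t.lstrip('-').isdigit()
--
--     n = 0
--     while n < len(tokens) and is_int_token(tokens[n]):
--         n += 1
--     return sum(int(t) for t in tokens[:n]), n == len(tokens)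
-- ===== Notes on version B (the rewrite author's own statement) =====
-- stated objective: alternative
-- what changed: Instead of one accumulate-and-early-return loop, B first scans for the length n of the leading run of int-like tokens (index while-loop, no accumulation), then sums int() over the slice tokens[:n] and compares n with the token count.
-- outside the precondition, e.g. on all_sum('--5'): A raises ValueError, B raises ValueError
import Mathlib
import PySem

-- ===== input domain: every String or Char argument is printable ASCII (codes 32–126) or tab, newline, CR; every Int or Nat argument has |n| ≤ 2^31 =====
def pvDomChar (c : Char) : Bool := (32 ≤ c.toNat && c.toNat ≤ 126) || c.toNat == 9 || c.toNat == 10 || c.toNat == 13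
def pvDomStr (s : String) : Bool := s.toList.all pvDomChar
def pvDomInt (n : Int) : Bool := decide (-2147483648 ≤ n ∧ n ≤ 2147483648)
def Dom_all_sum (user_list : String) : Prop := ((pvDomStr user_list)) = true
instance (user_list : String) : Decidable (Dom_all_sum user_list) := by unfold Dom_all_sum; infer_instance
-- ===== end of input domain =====

-- B changes the decomposition (boundary scan, then one sum over the slice) instead of A's
-- accumulate-with-early-return loop; same cost, proved equal on Pre_ (where int() does not raise).

-- i.lstrip of the minus sign, then .isdigit(): a one-character lstrip set is exactly dropWhile;
-- strIsdigit is PySem's s.isdigit() (exact on the ASCII domain).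
def pvOkTok (t : String) : Bool := PySem.Chars.strIsdigit (t.toList.dropWhile (· == '-'))

-- ===== PORT A =====
-- the for-loop over the split tokens, accumulator a, early return on the first non-int-like token
def allSumGo : List String → Int → Int × Bool
  | [], a => (a, true)
  | t :: ts, a =>
    if pvOkTok t then
      match PySem.Int.ofStr? t with    -- int(i)
      | some v => allSumGo ts (a + v)
      | none => (a, false)             -- ValueError: unreachable under Pre_all_sum
    else (a, false)

def all_sum (user_list : String) : Int × Bool :=
  allSumGo (PySem.Str.split₀ user_list) 0

-- ===== PORT B =====
-- while n < len(tokens) and is_int_token(tokens[n]): n += 1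
def pvScan (tokens : List String) (n : Nat) : Nat :=
  if h : n < tokens.length then
    if pvOkTok tokens[n] then pvScan tokens (n + 1) else n
  else n
termination_by tokens.length - n

def all_sum_alt (user_list : String) : Int × Bool :=
  let tokens := PySem.Str.split₀ user_list
  let n := pvScan tokens 0
  -- sum(int(t) for t in tokens[:n]); int() raises only on tokens Pre_all_sum excludes,
  -- so the getD default is never observed inside Pre_
  (((PySem.List.slice tokens none (some (n : Int))).map
      (fun t => (PySem.Int.ofStr? t).getD 0)).sum,
   n == tokens.length)

-- ===== PRECONDITION & SPEC =====
-- Pre_ excludes exactly the inputs on which Python A raises ValueError: a token in the leading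
-- run of int-like tokens (lstrip('-').isdigit() true) that int() cannot parse, e.g. '--5'.
def Pre_all_sum (user_list : String) : Prop :=
  ∀ t ∈ (PySem.Str.split₀ user_list).takeWhile pvOkTok, (PySem.Int.ofStr? t).isSome = true
instance (user_list : String) : Decidable (Pre_all_sum user_list) := by
  unfold Pre_all_sum; infer_instance

def pvWitness_all_sum : String := "1 -2 x"

def Spec_all_sum (user_list : String) (out : Int × Bool) : Prop := out = all_sum_alt user_list
instance (user_list : String) (out : Int × Bool) : Decidable (Spec_all_sum user_list out) := by
  unfold Spec_all_sum; infer_instance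

-- ===== CLAIM (what is proved, stated in full; the proofs are below) =====
def Claim_equal_all_sum : Prop :=
  ∀ (user_list : String), Dom_all_sum user_list → Pre_all_sum user_list →
    Spec_all_sum user_list (all_sum user_list)

-- ===== LEMMAS AND PROOFS =====

-- B's index scan computes the length of the valid prefix
lemma pvScan_eq (tokens : List String) (n : Nat) (hn : n ≤ tokens.length) :
    pvScan tokens n = n + ((tokens.drop n).takeWhile pvOkTok).length := by
  rw [pvScan]
  by_cases h : n < tokens.length
  · have hdrop : tokens.drop n = tokens[n] :: tokens.drop (n + 1) :=
      List.drop_eq_getElem_cons h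
    by_cases hok : pvOkTok tokens[n]
    · have hTW : (tokens.drop n).takeWhile pvOkTok
          = tokens[n] :: (tokens.drop (n + 1)).takeWhile pvOkTok := by
        rw [hdrop, List.takeWhile_cons, if_pos hok]
      rw [dif_pos h, if_pos hok, pvScan_eq tokens (n + 1) h, hTW]
      simp
      omega
    · have hTW : (tokens.drop n).takeWhile pvOkTok = [] := by
        rw [hdrop, List.takeWhile_cons, if_neg hok]
      rw [dif_pos h, if_neg hok, hTW]
      simp
  · rw [dif_neg h]
    have : n = tokens.length := le_antisymm hn (not_lt.mp h)
    simp [this]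
termination_by tokens.length - n

-- A's loop equals "sum over the valid prefix, flag = prefix covers everything"
lemma allSumGo_eq (l : List String) (a : Int)
    (hp : ∀ t ∈ l.takeWhile pvOkTok, (PySem.Int.ofStr? t).isSome = true) :
    allSumGo l a =
      (a + ((l.takeWhile pvOkTok).map (fun t => (PySem.Int.ofStr? t).getD 0)).sum,
       (l.takeWhile pvOkTok).length == l.length) := by
  induction l generalizing a with
  | nil => simp [allSumGo]
  | cons t ts ih =>
    by_cases hok : pvOkTok t
    · have hmem : t ∈ (t :: ts).takeWhile pvOkTok := by
        simp [hok]
      obtain ⟨v, hv⟩ := Option.isSome_iff_exists.mp (hp t hmem)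
      have hptail : ∀ t' ∈ ts.takeWhile pvOkTok, (PySem.Int.ofStr? t').isSome = true := by
        intro t' ht'
        exact hp t' (by simp [hok, ht'])
      rw [allSumGo, if_pos hok, hv]
      show allSumGo ts (a + v) = _
      rw [ih (a + v) hptail]
      simp [hok, hv]
      ring
    · rw [allSumGo, if_neg hok]
      simp [hok]

-- ===== VERDICT (by name: the statement is the Claim_ definition above) =====
theorem all_sum_spec : Claim_equal_all_sum := by
  intro u _ hpre
  unfold Spec_all_sum all_sum all_sum_alt
  show allSumGo (PySem.Str.split₀ u) 0 =
    (((PySem.List.slice (PySem.Str.split₀ u) none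
        (some ((pvScan (PySem.Str.split₀ u) 0 : Nat) : Int))).map
        (fun t => (PySem.Int.ofStr? t).getD 0)).sum,
     pvScan (PySem.Str.split₀ u) 0 == (PySem.Str.split₀ u).length)
  rw [allSumGo_eq _ _ hpre, pvScan_eq _ 0 (Nat.zero_le _), PySem.List.slice_to_natCast]
  have hle : List.findIdx (fun a => !pvOkTok a) (PySem.Str.split₀ u)
      ≤ (PySem.Str.split₀ u).length := List.findIdx_le_length
  simp [List.takeWhile_eq_take_findIdx_not, List.length_take, Nat.min_eq_left hle]
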